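-- pv_equiv track=rewrite | github.com/omer1998/DSA-MOOC-FI | week3/even.py | count_sublists
-- ===== SOURCE A (Python) =====
-- def count_sublists(numbers):
--
--     even_length = 0
--     count = 0
--
--     for num in numbers:
--         if num % 2 ==0:
--             even_length +=1
--             count += even_length
--
--         else:
--             even_length = 0
--     return count
-- ===== SOURCE B (Python) =====
-- def count_sublists(numbers):
--     bounds = [-1] + [i for i, x in enumerate(numbers) if x % 2 != 0] + [len(numbers)]
--     return sum((b - a - 1) * (b - a) // 2 for a, b in zip(bounds, bounds[1:]))
-- ===== Notes on version B (the rewrite author's own statement) =====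
-- stated objective: alternative
-- what changed: B first materialises the indices of the odd elements (with -1 and len sentinels) and then sums the closed-form triangular count over the gap between each pair of consecutive boundaries, replacing A's single-pass run-length accumulator with a staged index-list computation.
import Mathlib
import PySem

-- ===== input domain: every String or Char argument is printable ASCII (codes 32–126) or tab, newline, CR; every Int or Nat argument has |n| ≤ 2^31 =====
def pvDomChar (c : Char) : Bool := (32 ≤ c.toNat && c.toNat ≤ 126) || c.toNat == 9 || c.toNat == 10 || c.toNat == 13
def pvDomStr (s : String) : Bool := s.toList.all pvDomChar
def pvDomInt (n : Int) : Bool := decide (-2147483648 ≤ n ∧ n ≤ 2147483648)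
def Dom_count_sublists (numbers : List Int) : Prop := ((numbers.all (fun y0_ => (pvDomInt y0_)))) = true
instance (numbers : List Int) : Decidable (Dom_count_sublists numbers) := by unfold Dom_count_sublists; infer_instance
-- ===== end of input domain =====

-- B replaces A's running even-run accumulator with a staged computation: collect the odd-element indices (with -1/len sentinels), then sum the closed-form triangular count over each boundary gap (alternative decomposition, same cost).


-- ===== PORT A =====
def count_sublists (numbers : List Int) : Int :=
  (numbers.foldl (fun (st : Int × Int) num =>
      if PySem.Int.mod num 2 = 0 then (st.1 + 1, st.2 + (st.1 + 1))
      else (0, st.2)) (0, 0)).2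

-- ===== PORT B =====
-- [i for i, x in enumerate(numbers) if x % 2 != 0]
def pvOdds (numbers : List Int) : List Int :=
  (PySem.List.enumerate numbers).filterMap
    (fun p => if PySem.Int.mod p.2 2 ≠ 0 then some p.1 else none)

-- bounds = [-1] + odd indices + [len(numbers)]
def pvBounds (numbers : List Int) : List Int :=
  -1 :: (pvOdds numbers ++ [(numbers.length : Int)])

def count_sublists_alt (numbers : List Int) : Int :=
  (((pvBounds numbers).zip (pvBounds numbers).tail).map
    (fun p => PySem.Int.floordiv ((p.2 - p.1 - 1) * (p.2 - p.1)) 2)).sum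

-- ===== PRECONDITION & SPEC =====
def Spec_count_sublists (numbers : List Int) (out : Int) : Prop := out = count_sublists_alt numbers
instance (numbers : List Int) (out : Int) : Decidable (Spec_count_sublists numbers out) := by unfold Spec_count_sublists; infer_instance

-- ===== CLAIM (what is proved, stated in full; the proofs are below) =====
def Claim_equal_count_sublists : Prop := ∀ (numbers : List Int), Dom_count_sublists numbers → Spec_count_sublists numbers (count_sublists numbers)

-- ===== LEMMAS AND PROOFS =====

-- triangular number g*(g+1)//2 (proof-only abbreviation)
def pvTri (g : Int) : Int := PySem.Int.floordiv (g * (g + 1)) 2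

theorem pvTri_zero : pvTri 0 = 0 := by decide

theorem pvTri_succ (e : Int) : pvTri (e + 1) = pvTri e + (e + 1) := by
  unfold pvTri
  rw [PySem.Int.floordiv_eq_ediv_of_pos (by norm_num), PySem.Int.floordiv_eq_ediv_of_pos (by norm_num)]
  obtain ⟨k, hk⟩ := Int.even_mul_succ_self e
  have hk' : e * (e + 1) = 2 * k := by omega
  have hk2 : (e + 1) * (e + 1 + 1) = 2 * (k + e + 1) := by nlinarith
  rw [hk', hk2, Int.mul_ediv_cancel_left _ (by norm_num), Int.mul_ediv_cancel_left _ (by norm_num)]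
  omega

-- recursive gap-sum: pvGs prev bs = Σ tri(b-a-1) over consecutive boundaries
def pvGs : Int → List Int → Int
  | _, [] => 0
  | prev, b :: bs => pvTri (b - prev - 1) + pvGs b bs

-- the zip/map/sum of B equals pvGs
theorem pvZipSum (bs : List Int) (prev : Int) :
    (((prev :: bs).zip bs).map
      (fun p => PySem.Int.floordiv ((p.2 - p.1 - 1) * (p.2 - p.1)) 2)).sum = pvGs prev bs := by
  induction bs generalizing prev with
  | nil => simp [pvGs]
  | cons b bs ih =>
    simp only [List.zip_cons_cons, List.map_cons, List.sum_cons, ih b, pvGs, pvTri]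
    ring_nf

theorem pvGs_shift (bs : List Int) (prev : Int) :
    pvGs (prev + 1) (bs.map (· + 1)) = pvGs prev bs := by
  induction bs generalizing prev with
  | nil => simp [pvGs]
  | cons b bs ih => simp only [List.map_cons, pvGs, ih b]; ring_nf

-- length of the leading even run, as Int
def pvEwp (l : List Int) : Int :=
  ((l.takeWhile (fun x => decide (PySem.Int.mod x 2 = 0))).length : Int)

theorem pvEwp_cons_even (x : Int) (xs : List Int) (hx : PySem.Int.mod x 2 = 0) :
    pvEwp (x :: xs) = pvEwp xs + 1 := by
  unfold pvEwp
  rw [List.takeWhile_cons, if_pos (by simpa using hx)]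
  push_cast [List.length_cons]; ring

theorem pvEwp_cons_odd (x : Int) (xs : List Int) (hx : ¬ PySem.Int.mod x 2 = 0) :
    pvEwp (x :: xs) = 0 := by
  unfold pvEwp
  rw [List.takeWhile_cons, if_neg (by simpa using hx)]
  simp

theorem pvLenCast (x : Int) (xs : List Int) :
    (((x :: xs).length : Int)) = (xs.length : Int) + 1 := by
  push_cast [List.length_cons]; ring

theorem pvOdds_cons (x : Int) (xs : List Int) :
    pvOdds (x :: xs) =
      (if PySem.Int.mod x 2 ≠ 0 then [(0 : Int)] else []) ++ (pvOdds xs).map (· + 1) := by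
  have aux : ∀ (l : List Int) (s : Int),
      (PySem.List.enumerate l (s + 1)).filterMap
        (fun p => if PySem.Int.mod p.2 2 ≠ 0 then some p.1 else none)
      = ((PySem.List.enumerate l s).filterMap
          (fun p => if PySem.Int.mod p.2 2 ≠ 0 then some p.1 else none)).map (· + 1) := by
    intro l
    induction l with
    | nil => intro s; simp [PySem.List.enumerate_nil]
    | cons y ys ih =>
      intro s
      simp only [PySem.List.enumerate_cons, List.filterMap_cons]
      by_cases hy : PySem.Int.mod y 2 = 0
      · rw [if_neg (not_not_intro hy), if_neg (not_not_intro hy)]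
        exact ih (s + 1)
      · rw [if_pos hy, if_pos hy]
        exact congrArg (List.cons (s + 1)) (ih (s + 1))
  unfold pvOdds
  rw [PySem.List.enumerate_cons, List.filterMap_cons]
  by_cases hx : PySem.Int.mod x 2 = 0
  · rw [if_neg (not_not_intro hx), if_neg (not_not_intro hx), List.nil_append]
    exact aux xs 0
  · rw [if_pos hx, if_pos hx]
    exact congrArg (List.cons 0) (aux xs 0)

theorem pvMapBound (xs : List Int) :
    (pvOdds xs).map (· + 1) ++ [(xs.length : Int) + 1]
      = (pvOdds xs ++ [(xs.length : Int)]).map (· + 1) := by simp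

theorem pvHead (xs : List Int) :
    ∃ bs, pvOdds xs ++ [(xs.length : Int)] = pvEwp xs :: bs := by
  induction xs with
  | nil => exact ⟨[], by simp [pvOdds, PySem.List.enumerate_nil, pvEwp]⟩
  | cons x xs ih =>
    obtain ⟨bs, hbs⟩ := ih
    rw [pvOdds_cons, pvLenCast]
    by_cases hx : PySem.Int.mod x 2 = 0
    · refine ⟨bs.map (· + 1), ?_⟩
      rw [if_neg (not_not_intro hx), List.nil_append, pvMapBound, hbs, List.map_cons,
        pvEwp_cons_even x xs hx]
    · refine ⟨(pvOdds xs).map (· + 1) ++ [(xs.length : Int) + 1], ?_⟩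
      rw [if_pos hx, pvEwp_cons_odd x xs hx]
      simp

theorem pv_alt_odd (x : Int) (xs : List Int) (hx : ¬ PySem.Int.mod x 2 = 0) :
    count_sublists_alt (x :: xs) = count_sublists_alt xs := by
  unfold count_sublists_alt pvBounds
  simp only [List.tail_cons]
  rw [pvZipSum, pvZipSum, pvOdds_cons, if_pos hx, pvLenCast, List.cons_append, List.cons_append,
    List.nil_append, pvMapBound]
  show pvTri (0 - (-1) - 1) + pvGs 0 ((pvOdds xs ++ [(xs.length : Int)]).map (· + 1)) = _
  have hsh := pvGs_shift (pvOdds xs ++ [(xs.length : Int)]) (-1)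
  norm_num at hsh
  rw [show (0 : Int) - (-1) - 1 = 0 by ring, pvTri_zero, zero_add, ← pvMapBound]
  exact hsh

theorem pv_alt_even (x : Int) (xs : List Int) (hx : PySem.Int.mod x 2 = 0) :
    count_sublists_alt (x :: xs) = count_sublists_alt xs + pvEwp xs + 1 := by
  unfold count_sublists_alt pvBounds
  simp only [List.tail_cons]
  rw [pvZipSum, pvZipSum, pvOdds_cons, if_neg (not_not_intro hx), List.nil_append, pvLenCast,
    pvMapBound]
  obtain ⟨bs, hbs⟩ := pvHead xs
  rw [hbs, List.map_cons]
  show pvTri (pvEwp xs + 1 - (-1) - 1) + pvGs (pvEwp xs + 1) (bs.map (· + 1))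
      = pvTri (pvEwp xs - (-1) - 1) + pvGs (pvEwp xs) bs + pvEwp xs + 1
  rw [pvGs_shift bs (pvEwp xs),
    show pvEwp xs + 1 - (-1) - 1 = (pvEwp xs - (-1) - 1) + 1 by ring, pvTri_succ]
  ring

-- A-side: the fold with explicit starting state
def pvAFold (l : List Int) (st : Int × Int) : Int × Int :=
  l.foldl (fun (st : Int × Int) num =>
      if PySem.Int.mod num 2 = 0 then (st.1 + 1, st.2 + (st.1 + 1))
      else (0, st.2)) st

theorem pvA_addT (l : List Int) (e t c : Int) :
    (pvAFold l (e, t + c)).2 = (pvAFold l (e, t)).2 + c := by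
  induction l generalizing e t with
  | nil => simp [pvAFold]
  | cons x xs ih =>
    simp only [pvAFold, List.foldl_cons] at *
    by_cases hx : PySem.Int.mod x 2 = 0
    · simp only [hx, if_true]
      rw [show t + c + (e + 1) = (t + (e + 1)) + c by ring]
      exact ih (e + 1) (t + (e + 1))
    · simp only [hx, if_false]
      exact ih 0 t

theorem pvA_bump (l : List Int) (e t : Int) :
    (pvAFold l (e + 1, t)).2 = (pvAFold l (e, t)).2 + pvEwp l := by
  induction l generalizing e t with
  | nil => simp [pvAFold, pvEwp]
  | cons x xs ih =>
    simp only [pvAFold, List.foldl_cons] at *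
    by_cases hx : PySem.Int.mod x 2 = 0
    · simp only [hx, if_true]
      rw [pvEwp_cons_even x xs hx]
      have h1 := ih (e + 1) (t + (e + 1 + 1))
      have h2 := pvA_addT xs (e + 1) (t + (e + 1)) 1
      simp only [pvAFold] at h2
      rw [show t + (e + 1) + 1 = t + (e + 1 + 1) by ring] at h2
      omega
    · simp only [hx, if_false]
      rw [pvEwp_cons_odd x xs hx]
      omega

theorem pvA_even (x : Int) (xs : List Int) (hx : PySem.Int.mod x 2 = 0) :
    count_sublists (x :: xs) = count_sublists xs + pvEwp xs + 1 := by
  have h1 : (pvAFold xs (1, 1)).2 = (pvAFold xs (0, 1)).2 + pvEwp xs := by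
    simpa using pvA_bump xs 0 1
  have h2 : (pvAFold xs (0, 1)).2 = (pvAFold xs (0, 0)).2 + 1 := by
    simpa using pvA_addT xs 0 0 1
  have hgoal : (pvAFold xs (1, 1)).2 = (pvAFold xs (0, 0)).2 + pvEwp xs + 1 := by omega
  unfold count_sublists
  simp only [List.foldl_cons, hx, if_true]
  simpa [pvAFold] using hgoal

theorem pvMain (numbers : List Int) : count_sublists numbers = count_sublists_alt numbers := by
  induction numbers with
  | nil =>
    unfold count_sublists count_sublists_alt pvBounds
    simp only [List.tail_cons]
    rw [pvZipSum]
    simp [pvOdds, PySem.List.enumerate_nil, pvGs]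
    decide
  | cons x xs ih =>
    by_cases hx : PySem.Int.mod x 2 = 0
    · rw [pvA_even x xs hx, pv_alt_even x xs hx, ih]
    · rw [pv_alt_odd x xs hx]
      unfold count_sublists
      simp only [List.foldl_cons, hx, if_false]
      exact ih

-- ===== VERDICT (by name: the statement is the Claim_ definition above) =====
theorem count_sublists_spec : Claim_equal_count_sublists := by
  intro numbers _
  exact pvMain numbers
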